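-- pv_equiv track=rewrite | github.com/Tigrbl/tigrbl_auth | scripts/_surface_checks.py | infer_test_category
-- ===== SOURCE A (Python) =====
-- _AUXILIARY_TEST_CATEGORY_BY_PREFIX = {
--     "tests/examples/": "e2e",
-- }
--
-- def infer_test_category(rel_path: str) -> str | None:
--     normalized = rel_path.replace("\\", "/")
--     prefixes = {
--         "tests/unit/": "unit",
--         "tests/integration/": "integration",
--         "tests/runtime/": "integration",
--         "tests/conformance/": "conformance",
--         "tests/interop/": "interop",
--         "tests/e2e/": "e2e",
--         "tests/security/": "security",
--         "tests/negative/": "negative",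
--         "tests/perf/": "perf",
--     }
--     for prefix, category in prefixes.items():
--         if normalized.startswith(prefix):
--             return category
--     for prefix, category in _AUXILIARY_TEST_CATEGORY_BY_PREFIX.items():
--         if normalized.startswith(prefix):
--             return category
--     return None
-- ===== SOURCE B (Python) =====
-- def infer_test_category(rel_path: str) -> str | None:
--     normalized = rel_path.replace("\\", "/")
--     if not normalized.startswith("tests/"):
--         return None
--     rest = normalized[6:]
--     sep = rest.find("/")
--     if sep == -1:
--         return None
--     return {
--         "unit": "unit",
--         "integration": "integration",
--         "runtime": "integration",
--         "conformance": "conformance",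
--         "interop": "interop",
--         "e2e": "e2e",
--         "security": "security",
--         "negative": "negative",
--         "perf": "perf",
--         "examples": "e2e",
--     }.get(rest[:sep])
-- ===== Notes on version B (the rewrite author's own statement) =====
-- stated objective: simpler
-- what changed: Replaced A's linear scan over ten hard-coded directory prefixes (two dict loops of startswith checks) by one startswith check for the tests directory, extraction of the following path segment up to the next separator, and a single lookup of that segment in one merged segment-to-category dict.
import Mathlib
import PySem

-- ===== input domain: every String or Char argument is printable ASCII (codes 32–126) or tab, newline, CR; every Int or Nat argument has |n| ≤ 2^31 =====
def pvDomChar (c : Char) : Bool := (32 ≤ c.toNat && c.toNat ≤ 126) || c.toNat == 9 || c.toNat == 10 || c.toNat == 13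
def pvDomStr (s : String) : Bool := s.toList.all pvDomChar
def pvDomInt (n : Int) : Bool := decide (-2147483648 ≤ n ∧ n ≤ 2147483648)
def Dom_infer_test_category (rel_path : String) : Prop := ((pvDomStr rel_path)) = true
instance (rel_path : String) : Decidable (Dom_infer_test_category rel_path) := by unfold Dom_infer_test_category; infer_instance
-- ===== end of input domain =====

-- B replaces A's linear scan over ten string prefixes by one startswith check plus a
-- single-segment dictionary lookup (simpler/idiomatic; same observable behaviour).

-- ===== PORT A =====
-- the module constant _AUXILIARY_TEST_CATEGORY_BY_PREFIX
def auxTestCategoryByPrefix : PySem.Dict String String :=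
  PySem.Dict.ofList [("tests/examples/", "e2e")]

-- the 'for prefix, category in d.items(): if normalized.startswith(prefix): return category' loop
def pyPrefixLoop (normalized : String) : List (String × String) → Option String
  | [] => none
  | (pfx, category) :: rest =>
    if PySem.Str.startswith normalized pfx then some category
    else pyPrefixLoop normalized rest

def infer_test_category (rel_path : String) : Option String :=
  let normalized := PySem.Str.replace rel_path "\\" "/"
  let prefixes : PySem.Dict String String := PySem.Dict.ofList
    [("tests/unit/", "unit"),
     ("tests/integration/", "integration"),
     ("tests/runtime/", "integration"),
     ("tests/conformance/", "conformance"),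
     ("tests/interop/", "interop"),
     ("tests/e2e/", "e2e"),
     ("tests/security/", "security"),
     ("tests/negative/", "negative"),
     ("tests/perf/", "perf")]
  match pyPrefixLoop normalized prefixes.items with
  | some category => some category
  | none => pyPrefixLoop normalized auxTestCategoryByPrefix.items

-- ===== PORT B =====
def altCategoryBySegment : PySem.Dict String String :=
  PySem.Dict.ofList
    [("unit", "unit"),
     ("integration", "integration"),
     ("runtime", "integration"),
     ("conformance", "conformance"),
     ("interop", "interop"),
     ("e2e", "e2e"),
     ("security", "security"),
     ("negative", "negative"),
     ("perf", "perf"),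
     ("examples", "e2e")]

def infer_test_category_alt (rel_path : String) : Option String :=
  let normalized := PySem.Str.replace rel_path "\\" "/"
  if PySem.Str.startswith normalized "tests/" then
    let rest := PySem.Str.slice normalized (some 6) none
    let sep := PySem.Str.find rest "/"
    if sep = -1 then none
    else altCategoryBySegment.get? (PySem.Str.slice rest none (some sep))
  else none

-- ===== PRECONDITION & SPEC =====
def Spec_infer_test_category (rel_path : String) (out : Option String) : Prop := out = infer_test_category_alt rel_path
instance (rel_path : String) (out : Option String) : Decidable (Spec_infer_test_category rel_path out) := by unfold Spec_infer_test_category; infer_instance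

-- ===== CLAIM (what is proved, stated in full; the proofs are below) =====
def Claim_equal_infer_test_category : Prop := ∀ (rel_path : String), Dom_infer_test_category rel_path → Spec_infer_test_category rel_path (infer_test_category rel_path)

-- ===== LEMMAS AND PROOFS =====

-- '(k ++ "/") is a prefix of r' ↔ 'r has a "/" and the part before the first "/" is k'
lemma seg_prefix_iff (r k : List Char) (hk : '/' ∉ k) :
    (k ++ ['/']) <+: r ↔
      0 ≤ PySem.Chars.find r ['/'] ∧ r.take (PySem.Chars.find r ['/']).toNat = k := by
  constructor
  · rintro ⟨u, hu⟩
    have hmem : '/' ∈ r := by rw [← hu]; simp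
    have hf : 0 ≤ PySem.Chars.find r ['/'] :=
      (PySem.Chars.find_nonneg_iff r ['/']).mpr ((List.singleton_infix_iff _ _).mpr hmem)
    obtain ⟨hpre, hmin⟩ := PySem.Chars.find_spec hf
    set j := (PySem.Chars.find r ['/']).toNat with hj
    have hle : j ≤ k.length := by
      by_contra h
      push Not at h
      refine hmin k.length h ⟨u, ?_⟩
      rw [← hu, List.append_assoc, List.drop_left]
    have hge : ¬ j < k.length := by
      intro hlt
      obtain ⟨v, hv⟩ := hpre
      have h1 : r[j]? = some '/' := by
        have h0 := (List.getElem?_drop (xs := r) (i := j) (j := 0)).symm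
        rw [← hv] at h0
        simpa using h0
      have h2 : r[j]? = k[j]? := by
        rw [← hu, List.append_assoc, List.getElem?_append_left hlt]
      rw [h2, List.getElem?_eq_getElem hlt] at h1
      exact hk (by simpa [Option.some_inj.mp h1] using List.getElem_mem hlt)
    have hjk : j = k.length := le_antisymm hle (not_lt.mp hge)
    refine ⟨hf, ?_⟩
    rw [hjk, ← hu, List.append_assoc]
    exact List.take_left
  · rintro ⟨hf, ht⟩
    obtain ⟨hpre, -⟩ := PySem.Chars.find_spec hf
    obtain ⟨v, hv⟩ := hpre
    refine ⟨v, ?_⟩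
    calc (k ++ ['/']) ++ v = k ++ (['/'] ++ v) := by rw [List.append_assoc]
    _ = r.take (PySem.Chars.find r ['/']).toNat ++ r.drop (PySem.Chars.find r ['/']).toNat := by
        rw [ht, hv]
    _ = r := List.take_append_drop _ r

-- the heart of the equivalence, on the normalized string
lemma body_eq (n : String) :
    (match pyPrefixLoop n (PySem.Dict.ofList
        [("tests/unit/", "unit"),
         ("tests/integration/", "integration"),
         ("tests/runtime/", "integration"),
         ("tests/conformance/", "conformance"),
         ("tests/interop/", "interop"),
         ("tests/e2e/", "e2e"),
         ("tests/security/", "security"),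
         ("tests/negative/", "negative"),
         ("tests/perf/", "perf")] : PySem.Dict String String).items with
     | some category => some category
     | none => pyPrefixLoop n auxTestCategoryByPrefix.items) =
    (if PySem.Str.startswith n "tests/" then
       if PySem.Str.find (PySem.Str.slice n (some 6) none) "/" = -1 then none
       else altCategoryBySegment.get?
         (PySem.Str.slice (PySem.Str.slice n (some 6) none) none
           (some (PySem.Str.find (PySem.Str.slice n (some 6) none) "/")))
     else none) := by
  have items9 : (PySem.Dict.ofList
        [("tests/unit/", "unit"),
         ("tests/integration/", "integration"),
         ("tests/runtime/", "integration"),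
         ("tests/conformance/", "conformance"),
         ("tests/interop/", "interop"),
         ("tests/e2e/", "e2e"),
         ("tests/security/", "security"),
         ("tests/negative/", "negative"),
         ("tests/perf/", "perf")] : PySem.Dict String String).items =
        [("tests/unit/", "unit"),
         ("tests/integration/", "integration"),
         ("tests/runtime/", "integration"),
         ("tests/conformance/", "conformance"),
         ("tests/interop/", "interop"),
         ("tests/e2e/", "e2e"),
         ("tests/security/", "security"),
         ("tests/negative/", "negative"),
         ("tests/perf/", "perf")] := rfl
  have itemsAux : auxTestCategoryByPrefix.items = [("tests/examples/", "e2e")] := rfl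
  have itemsAlt : altCategoryBySegment.items =
    [("unit", "unit"), ("integration", "integration"), ("runtime", "integration"),
     ("conformance", "conformance"), ("interop", "interop"), ("e2e", "e2e"),
     ("security", "security"), ("negative", "negative"), ("perf", "perf"),
     ("examples", "e2e")] := rfl
  by_cases h6 : PySem.Str.startswith n "tests/" = true
  case neg =>
    rw [if_neg h6]
    have h6' : ¬ ("tests/".toList <+: n.toList) := by
      intro hp
      exact h6 (by simpa [PySem.Chars.startswith_iff] using hp)
    have hsw : ∀ p : String, "tests/".toList <+: p.toList → PySem.Str.startswith n p = false := by
      intro p hp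
      rw [← Bool.not_eq_true]
      simp only [PySem.Str.startswith_eq, PySem.Chars.startswith_iff]
      exact fun hnp => h6' (hp.trans hnp)
    simp only [pyPrefixLoop, items9, itemsAux, hsw "tests/unit/" (by decide), hsw "tests/integration/" (by decide), hsw "tests/runtime/" (by decide), hsw "tests/conformance/" (by decide), hsw "tests/interop/" (by decide), hsw "tests/e2e/" (by decide), hsw "tests/security/" (by decide), hsw "tests/negative/" (by decide), hsw "tests/perf/" (by decide), hsw "tests/examples/" (by decide)]
    rfl
  case pos =>
    rw [if_pos h6]
    obtain ⟨r, hr⟩ : ∃ r, "tests/".toList ++ r = n.toList := by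
      simpa [PySem.Chars.startswith_iff, List.IsPrefix] using h6
    have hrest : (PySem.Str.slice n (some 6) none).toList = r := by
      simp only [PySem.Str.toList_slice, PySem.Chars.slice_eq_listSlice,
        PySem.List.slice_from _ (by norm_num : (0:Int) ≤ 6)]
      rw [← hr]
      rfl
    have hsep : PySem.Str.find (PySem.Str.slice n (some 6) none) "/" = PySem.Chars.find r ['/'] := by
      rw [PySem.Str.find_eq, hrest]
      rfl
    rw [hsep]
    by_cases hF : PySem.Chars.find r ['/'] = -1
    · rw [if_pos hF]
      have hA : ∀ p k : String, p.toList = "tests/".toList ++ (k.toList ++ ['/']) → '/' ∉ k.toList →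
          PySem.Str.startswith n p = false := by
        intro p k hp hk
        rw [← Bool.not_eq_true]
        simp only [PySem.Str.startswith_eq, PySem.Chars.startswith_iff, hp, ← hr,
          List.prefix_append_right_inj, seg_prefix_iff r k.toList hk]
        rintro ⟨h0, -⟩
        omega
      simp only [pyPrefixLoop, items9, itemsAux, hA "tests/unit/" "unit" (by decide) (by decide), hA "tests/integration/" "integration" (by decide) (by decide), hA "tests/runtime/" "runtime" (by decide) (by decide), hA "tests/conformance/" "conformance" (by decide) (by decide), hA "tests/interop/" "interop" (by decide) (by decide), hA "tests/e2e/" "e2e" (by decide) (by decide), hA "tests/security/" "security" (by decide) (by decide), hA "tests/negative/" "negative" (by decide) (by decide), hA "tests/perf/" "perf" (by decide) (by decide), hA "tests/examples/" "examples" (by decide) (by decide)]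
      rfl
    · rw [if_neg hF]
      have h0F : 0 ≤ PySem.Chars.find r ['/'] := by
        have := PySem.Chars.neg_one_le_find r ['/']
        omega
      set t := List.take (PySem.Chars.find r ['/']).toNat r with htdef
      have hkey : ∀ p k : String, p.toList = "tests/".toList ++ (k.toList ++ ['/']) → '/' ∉ k.toList →
          PySem.Str.startswith n p = decide (t = k.toList) := by
        intro p k hp hk
        rw [Bool.eq_iff_iff, decide_eq_true_eq, htdef]
        simp only [PySem.Str.startswith_eq, PySem.Chars.startswith_iff, hp, ← hr,
          List.prefix_append_right_inj, seg_prefix_iff r k.toList hk]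
        simp [h0F]
      set skey := PySem.Str.slice (PySem.Str.slice n (some 6) none) none
          (some (PySem.Chars.find r ['/'])) with hskey
      have hkeyt : skey.toList = t := by
        rw [hskey, htdef]
        simp only [PySem.Str.toList_slice, PySem.Chars.slice_eq_listSlice,
          PySem.List.slice_to _ h0F, hrest]
      by_cases b0 : t = "unit".toList
      · have hs : skey = "unit" := String.toList_inj.mp (by rw [hkeyt]; exact b0)
        rw [hs]
        simp only [pyPrefixLoop, items9, itemsAux, hkey "tests/unit/" "unit" (by decide) (by decide), hkey "tests/integration/" "integration" (by decide) (by decide), hkey "tests/runtime/" "runtime" (by decide) (by decide), hkey "tests/conformance/" "conformance" (by decide) (by decide), hkey "tests/interop/" "interop" (by decide) (by decide), hkey "tests/e2e/" "e2e" (by decide) (by decide), hkey "tests/security/" "security" (by decide) (by decide), hkey "tests/negative/" "negative" (by decide) (by decide), hkey "tests/perf/" "perf" (by decide) (by decide), hkey "tests/examples/" "examples" (by decide) (by decide), b0]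
        rfl
      by_cases b1 : t = "integration".toList
      · have hs : skey = "integration" := String.toList_inj.mp (by rw [hkeyt]; exact b1)
        rw [hs]
        simp only [pyPrefixLoop, items9, itemsAux, hkey "tests/unit/" "unit" (by decide) (by decide), hkey "tests/integration/" "integration" (by decide) (by decide), hkey "tests/runtime/" "runtime" (by decide) (by decide), hkey "tests/conformance/" "conformance" (by decide) (by decide), hkey "tests/interop/" "interop" (by decide) (by decide), hkey "tests/e2e/" "e2e" (by decide) (by decide), hkey "tests/security/" "security" (by decide) (by decide), hkey "tests/negative/" "negative" (by decide) (by decide), hkey "tests/perf/" "perf" (by decide) (by decide), hkey "tests/examples/" "examples" (by decide) (by decide), b1]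
        rfl
      by_cases b2 : t = "runtime".toList
      · have hs : skey = "runtime" := String.toList_inj.mp (by rw [hkeyt]; exact b2)
        rw [hs]
        simp only [pyPrefixLoop, items9, itemsAux, hkey "tests/unit/" "unit" (by decide) (by decide), hkey "tests/integration/" "integration" (by decide) (by decide), hkey "tests/runtime/" "runtime" (by decide) (by decide), hkey "tests/conformance/" "conformance" (by decide) (by decide), hkey "tests/interop/" "interop" (by decide) (by decide), hkey "tests/e2e/" "e2e" (by decide) (by decide), hkey "tests/security/" "security" (by decide) (by decide), hkey "tests/negative/" "negative" (by decide) (by decide), hkey "tests/perf/" "perf" (by decide) (by decide), hkey "tests/examples/" "examples" (by decide) (by decide), b2]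
        rfl
      by_cases b3 : t = "conformance".toList
      · have hs : skey = "conformance" := String.toList_inj.mp (by rw [hkeyt]; exact b3)
        rw [hs]
        simp only [pyPrefixLoop, items9, itemsAux, hkey "tests/unit/" "unit" (by decide) (by decide), hkey "tests/integration/" "integration" (by decide) (by decide), hkey "tests/runtime/" "runtime" (by decide) (by decide), hkey "tests/conformance/" "conformance" (by decide) (by decide), hkey "tests/interop/" "interop" (by decide) (by decide), hkey "tests/e2e/" "e2e" (by decide) (by decide), hkey "tests/security/" "security" (by decide) (by decide), hkey "tests/negative/" "negative" (by decide) (by decide), hkey "tests/perf/" "perf" (by decide) (by decide), hkey "tests/examples/" "examples" (by decide) (by decide), b3]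
        rfl
      by_cases b4 : t = "interop".toList
      · have hs : skey = "interop" := String.toList_inj.mp (by rw [hkeyt]; exact b4)
        rw [hs]
        simp only [pyPrefixLoop, items9, itemsAux, hkey "tests/unit/" "unit" (by decide) (by decide), hkey "tests/integration/" "integration" (by decide) (by decide), hkey "tests/runtime/" "runtime" (by decide) (by decide), hkey "tests/conformance/" "conformance" (by decide) (by decide), hkey "tests/interop/" "interop" (by decide) (by decide), hkey "tests/e2e/" "e2e" (by decide) (by decide), hkey "tests/security/" "security" (by decide) (by decide), hkey "tests/negative/" "negative" (by decide) (by decide), hkey "tests/perf/" "perf" (by decide) (by decide), hkey "tests/examples/" "examples" (by decide) (by decide), b4]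
        rfl
      by_cases b5 : t = "e2e".toList
      · have hs : skey = "e2e" := String.toList_inj.mp (by rw [hkeyt]; exact b5)
        rw [hs]
        simp only [pyPrefixLoop, items9, itemsAux, hkey "tests/unit/" "unit" (by decide) (by decide), hkey "tests/integration/" "integration" (by decide) (by decide), hkey "tests/runtime/" "runtime" (by decide) (by decide), hkey "tests/conformance/" "conformance" (by decide) (by decide), hkey "tests/interop/" "interop" (by decide) (by decide), hkey "tests/e2e/" "e2e" (by decide) (by decide), hkey "tests/security/" "security" (by decide) (by decide), hkey "tests/negative/" "negative" (by decide) (by decide), hkey "tests/perf/" "perf" (by decide) (by decide), hkey "tests/examples/" "examples" (by decide) (by decide), b5]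
        rfl
      by_cases b6 : t = "security".toList
      · have hs : skey = "security" := String.toList_inj.mp (by rw [hkeyt]; exact b6)
        rw [hs]
        simp only [pyPrefixLoop, items9, itemsAux, hkey "tests/unit/" "unit" (by decide) (by decide), hkey "tests/integration/" "integration" (by decide) (by decide), hkey "tests/runtime/" "runtime" (by decide) (by decide), hkey "tests/conformance/" "conformance" (by decide) (by decide), hkey "tests/interop/" "interop" (by decide) (by decide), hkey "tests/e2e/" "e2e" (by decide) (by decide), hkey "tests/security/" "security" (by decide) (by decide), hkey "tests/negative/" "negative" (by decide) (by decide), hkey "tests/perf/" "perf" (by decide) (by decide), hkey "tests/examples/" "examples" (by decide) (by decide), b6]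
        rfl
      by_cases b7 : t = "negative".toList
      · have hs : skey = "negative" := String.toList_inj.mp (by rw [hkeyt]; exact b7)
        rw [hs]
        simp only [pyPrefixLoop, items9, itemsAux, hkey "tests/unit/" "unit" (by decide) (by decide), hkey "tests/integration/" "integration" (by decide) (by decide), hkey "tests/runtime/" "runtime" (by decide) (by decide), hkey "tests/conformance/" "conformance" (by decide) (by decide), hkey "tests/interop/" "interop" (by decide) (by decide), hkey "tests/e2e/" "e2e" (by decide) (by decide), hkey "tests/security/" "security" (by decide) (by decide), hkey "tests/negative/" "negative" (by decide) (by decide), hkey "tests/perf/" "perf" (by decide) (by decide), hkey "tests/examples/" "examples" (by decide) (by decide), b7]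
        rfl
      by_cases b8 : t = "perf".toList
      · have hs : skey = "perf" := String.toList_inj.mp (by rw [hkeyt]; exact b8)
        rw [hs]
        simp only [pyPrefixLoop, items9, itemsAux, hkey "tests/unit/" "unit" (by decide) (by decide), hkey "tests/integration/" "integration" (by decide) (by decide), hkey "tests/runtime/" "runtime" (by decide) (by decide), hkey "tests/conformance/" "conformance" (by decide) (by decide), hkey "tests/interop/" "interop" (by decide) (by decide), hkey "tests/e2e/" "e2e" (by decide) (by decide), hkey "tests/security/" "security" (by decide) (by decide), hkey "tests/negative/" "negative" (by decide) (by decide), hkey "tests/perf/" "perf" (by decide) (by decide), hkey "tests/examples/" "examples" (by decide) (by decide), b8]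
        rfl
      by_cases b9 : t = "examples".toList
      · have hs : skey = "examples" := String.toList_inj.mp (by rw [hkeyt]; exact b9)
        rw [hs]
        simp only [pyPrefixLoop, items9, itemsAux, hkey "tests/unit/" "unit" (by decide) (by decide), hkey "tests/integration/" "integration" (by decide) (by decide), hkey "tests/runtime/" "runtime" (by decide) (by decide), hkey "tests/conformance/" "conformance" (by decide) (by decide), hkey "tests/interop/" "interop" (by decide) (by decide), hkey "tests/e2e/" "e2e" (by decide) (by decide), hkey "tests/security/" "security" (by decide) (by decide), hkey "tests/negative/" "negative" (by decide) (by decide), hkey "tests/perf/" "perf" (by decide) (by decide), hkey "tests/examples/" "examples" (by decide) (by decide), b9]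
        rfl
      have hne : ∀ k : String, t ≠ k.toList → (k == skey) = false := by
        intro k hk
        rw [beq_eq_false_iff_ne]
        intro he
        exact hk (by rw [← he] at hkeyt; exact hkeyt.symm)
      have hB : altCategoryBySegment.get? skey = none := by
        simp [PySem.Dict.get?, itemsAlt, List.find?, hne "unit" b0, hne "integration" b1, hne "runtime" b2, hne "conformance" b3, hne "interop" b4, hne "e2e" b5, hne "security" b6, hne "negative" b7, hne "perf" b8, hne "examples" b9]
      rw [hB]
      simp only [pyPrefixLoop, items9, itemsAux, hkey "tests/unit/" "unit" (by decide) (by decide), hkey "tests/integration/" "integration" (by decide) (by decide), hkey "tests/runtime/" "runtime" (by decide) (by decide), hkey "tests/conformance/" "conformance" (by decide) (by decide), hkey "tests/interop/" "interop" (by decide) (by decide), hkey "tests/e2e/" "e2e" (by decide) (by decide), hkey "tests/security/" "security" (by decide) (by decide), hkey "tests/negative/" "negative" (by decide) (by decide), hkey "tests/perf/" "perf" (by decide) (by decide), hkey "tests/examples/" "examples" (by decide) (by decide)]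
      simp only [decide_eq_false b0, decide_eq_false b1, decide_eq_false b2, decide_eq_false b3, decide_eq_false b4, decide_eq_false b5, decide_eq_false b6, decide_eq_false b7, decide_eq_false b8, decide_eq_false b9]
      rfl

-- ===== VERDICT (by name: the statement is the Claim_ definition above) =====
theorem infer_test_category_spec : Claim_equal_infer_test_category := by
  intro rel_path _
  unfold Spec_infer_test_category infer_test_category infer_test_category_alt
  exact body_eq (PySem.Str.replace rel_path "\\" "/")
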